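-- pv_equiv track=rewrite | github.com/shiziksama/lbmap | o5m/filter_osmium.py | has_keyword
-- ===== SOURCE A (Python) =====
-- KEYWORDS = ("cycle", "foot", "track", "pedestrian")
--
-- def has_keyword(tags):
--     for k, v in tags.items():
--         kl = k.lower()
--         vl = v.lower()
--         for kw in KEYWORDS:
--             if kw in kl or kw in vl:
--                 return True
--     return False
-- ===== SOURCE B (Python) =====
-- KEYWORDS = ("cycle", "foot", "track", "pedestrian")
--
-- def has_keyword(tags):
--     # Join every lowercased key and value into one string, separated by a
--     # newline (absent from every keyword, so no cross-boundary match),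
--     # then do the four fixed substring tests once over that single string.
--     text = "\n".join(s.lower() for kv in tags.items() for s in kv)
--     return any(kw in text for kw in KEYWORDS)
-- ===== Notes on version B (the rewrite author's own statement) =====
-- stated objective: alternative
-- what changed: B concatenates all lowercased keys and values once into a single newline-separated string and runs the four keyword substring tests over that one string, instead of A's per-tag loop with an inner per-keyword scan and early return.
import Mathlib
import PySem

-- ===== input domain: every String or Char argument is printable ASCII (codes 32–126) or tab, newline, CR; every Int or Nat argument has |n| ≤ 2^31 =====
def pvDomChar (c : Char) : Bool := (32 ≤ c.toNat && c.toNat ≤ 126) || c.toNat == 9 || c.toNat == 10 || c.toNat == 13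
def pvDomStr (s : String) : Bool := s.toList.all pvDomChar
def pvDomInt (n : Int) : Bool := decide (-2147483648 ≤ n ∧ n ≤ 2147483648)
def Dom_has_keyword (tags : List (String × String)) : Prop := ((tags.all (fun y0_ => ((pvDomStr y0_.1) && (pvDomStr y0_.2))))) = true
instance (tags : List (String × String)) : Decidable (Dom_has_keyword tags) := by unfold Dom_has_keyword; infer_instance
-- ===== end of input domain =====

-- B builds one newline-separated lowercased string from all keys and values and runs the
-- four keyword substring tests once over it, instead of A's per-tag loop with an inner
-- per-keyword scan (objective: alternative decomposition, same cost).

-- ===== PORT A =====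
def pvKeywords : List String := ["cycle", "foot", "track", "pedestrian"]

def has_keyword : List (String × String) → Bool
  | [] => false
  | (k, v) :: rest =>
    let kl := PySem.Str.lower k
    let vl := PySem.Str.lower v
    if pvKeywords.any (fun kw => PySem.Str.isIn kw kl || PySem.Str.isIn kw vl) then true
    else has_keyword rest

-- ===== PORT B =====
def has_keyword_alt (tags : List (String × String)) : Bool :=
  let text := PySem.Str.join "\n"
    (tags.flatMap (fun kv => [PySem.Str.lower kv.1, PySem.Str.lower kv.2]))
  pvKeywords.any (fun kw => PySem.Str.isIn kw text)

-- ===== PRECONDITION & SPEC =====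
def Spec_has_keyword (tags : List (String × String)) (out : Bool) : Prop := out = has_keyword_alt tags
instance (tags : List (String × String)) (out : Bool) : Decidable (Spec_has_keyword tags out) := by unfold Spec_has_keyword; infer_instance

-- ===== CLAIM (what is proved, stated in full; the proofs are below) =====
def Claim_equal_has_keyword : Prop := ∀ (tags : List (String × String)), Dom_has_keyword tags → Spec_has_keyword tags (has_keyword tags)

-- ===== LEMMAS AND PROOFS =====

-- a prefix of a ++ c :: b avoiding c is a prefix of a
theorem pv_prefix_append_cons {α : Type} {kw a b : List α} {c : α}
    (hc : c ∉ kw) (h : kw <+: a ++ c :: b) : kw <+: a := by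
  induction a generalizing kw with
  | nil =>
    cases kw with
    | nil => exact List.nil_prefix
    | cons x kw' =>
      rw [List.nil_append, List.cons_prefix_cons] at h
      exact absurd (h.1 ▸ List.mem_cons_self) hc
  | cons x a' ih =>
    cases kw with
    | nil => exact List.nil_prefix
    | cons y kw' =>
      rw [List.cons_append, List.cons_prefix_cons] at h
      exact List.cons_prefix_cons.mpr ⟨h.1, ih (fun hm => hc (List.mem_cons_of_mem _ hm)) h.2⟩

-- an infix of a ++ c :: b avoiding c is an infix of a or of b
theorem pv_infix_append_cons {α : Type} {kw a b : List α} {c : α}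
    (hc : c ∉ kw) (h : kw <:+: a ++ c :: b) : kw <:+: a ∨ kw <:+: b := by
  induction a generalizing kw with
  | nil =>
    rw [List.nil_append, List.infix_cons_iff] at h
    rcases h with h | h
    · have := pv_prefix_append_cons (a := []) hc h
      rw [List.prefix_nil] at this
      exact Or.inl (this ▸ List.nil_infix)
    · exact Or.inr h
  | cons x a' ih =>
    rw [List.cons_append, List.infix_cons_iff] at h
    rcases h with h | h
    · exact Or.inl (pv_prefix_append_cons hc h).isInfix
    · rcases ih hc h with h' | h'
      · exact Or.inl (List.infix_cons h')
      · exact Or.inr h'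

-- substring of the '\n'-join ↔ substring of some piece (kw nonempty, '\n'-free)
theorem pv_isIn_join (kw : List Char) (hk : kw ≠ []) (hc : ('\n' : Char) ∉ kw)
    (ps : List (List Char)) :
    PySem.Chars.isIn kw (PySem.Chars.join ['\n'] ps)
      = ps.any (fun p => PySem.Chars.isIn kw p) := by
  induction ps with
  | nil =>
    simp only [PySem.Chars.join_nil, List.any_nil]
    rw [PySem.Chars.isIn_eq_false_iff]
    intro hinf
    exact hk (List.infix_nil.mp hinf)
  | cons p ps' ih =>
    cases ps' with
    | nil =>
      simp [PySem.Chars.join_singleton]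
    | cons q rest =>
      rw [PySem.Chars.join_cons_cons]
      have hshape : p ++ ['\n'] ++ PySem.Chars.join ['\n'] (q :: rest)
          = p ++ '\n' :: PySem.Chars.join ['\n'] (q :: rest) := by
        simp
      rw [hshape, Bool.eq_iff_iff, PySem.Chars.isIn_iff_infix]
      constructor
      · intro h
        rw [List.any_cons, Bool.or_eq_true, ← ih]
        rcases pv_infix_append_cons hc h with h' | h'
        · exact Or.inl ((PySem.Chars.isIn_iff_infix _ _).mpr h')
        · exact Or.inr ((PySem.Chars.isIn_iff_infix _ _).mpr h')
      · intro h
        rw [List.any_cons, Bool.or_eq_true, ← ih] at h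
        rcases h with h | h
        · rw [PySem.Chars.isIn_iff_infix] at h
          exact h.trans (List.prefix_append _ _).isInfix
        · rw [PySem.Chars.isIn_iff_infix] at h
          exact h.trans ((List.suffix_cons _ _).trans (List.suffix_append _ _)).isInfix

-- string-level version
theorem pv_str_isIn_join (kw : String) (hk : kw.toList ≠ []) (hc : ('\n' : Char) ∉ kw.toList)
    (parts : List String) :
    PySem.Str.isIn kw (PySem.Str.join "\n" parts)
      = parts.any (fun p => PySem.Str.isIn kw p) := by
  rw [PySem.Str.isIn_eq, PySem.Str.toList_join]
  have : ("\n" : String).toList = ['\n'] := rfl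
  rw [this, pv_isIn_join kw.toList hk hc, List.any_map]
  apply List.any_congr rfl
  intro p
  simp

-- any over the two-piece flatMap
theorem pv_any_flatMap_pair {α : Type} (l : List α) (f g : α → String) (p : String → Bool) :
    (l.flatMap (fun kv => [f kv, g kv])).any p = l.any (fun kv => p (f kv) || p (g kv)) := by
  induction l with
  | nil => rfl
  | cons x t ih => simp [List.flatMap_cons, ih, Bool.or_assoc]

-- exchange the two any-loops
theorem pv_any_swap {α β : Type} (l : List α) (m : List β) (g : α → β → Bool) :
    l.any (fun a => m.any (fun b => g a b)) = m.any (fun b => l.any (fun a => g a b)) := by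
  rw [Bool.eq_iff_iff]
  simp only [List.any_eq_true]
  constructor
  · rintro ⟨a, ha, b, hb, h⟩; exact ⟨b, hb, a, ha, h⟩
  · rintro ⟨b, hb, a, ha, h⟩; exact ⟨a, ha, b, hb, h⟩

-- A's early-return loop is an any
theorem pv_hasA_eq_any (tags : List (String × String)) :
    has_keyword tags = tags.any (fun kv =>
      pvKeywords.any (fun kw =>
        PySem.Str.isIn kw (PySem.Str.lower kv.1) || PySem.Str.isIn kw (PySem.Str.lower kv.2))) := by
  induction tags with
  | nil => rfl
  | cons kv t ih =>
    obtain ⟨k, v⟩ := kv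
    simp only [has_keyword, List.any_cons, ← ih]
    split <;> simp_all

-- ===== VERDICT (by name: the statement is the Claim_ definition above) =====
theorem has_keyword_spec : Claim_equal_has_keyword := by
  intro tags _
  unfold Spec_has_keyword has_keyword_alt
  have key : ∀ (kw : String), kw.toList ≠ [] → ('\n' : Char) ∉ kw.toList →
      PySem.Str.isIn kw (PySem.Str.join "\n"
        (tags.flatMap (fun kv => [PySem.Str.lower kv.1, PySem.Str.lower kv.2])))
        = tags.any (fun kv =>
            PySem.Str.isIn kw (PySem.Str.lower kv.1) || PySem.Str.isIn kw (PySem.Str.lower kv.2)) := by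
    intro kw h1 h2
    rw [pv_str_isIn_join kw h1 h2, pv_any_flatMap_pair]
  rw [pv_hasA_eq_any, pv_any_swap]
  simp only [pvKeywords, List.any_cons, List.any_nil]
  rw [key "cycle" (by decide) (by decide), key "foot" (by decide) (by decide),
    key "track" (by decide) (by decide), key "pedestrian" (by decide) (by decide)]
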